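-- pv_equiv track=rewrite | github.com/dianaabdirahmanova711-tech/homeworks | lab1/1.task.py | remove_elements_with_common_digits
-- ===== SOURCE A (Python) =====
-- def remove_elements_with_common_digits(a):
--     digit_sum={}
--     for num in a:
--         n=abs(num)
--         digits=set()
--         if n==0:
--             digits.add(0)
--         while n>0:
--             digits.add(n%10)
--             n=n//10
--         for d in digits:
--             if d in digit_sum:
--                 digit_sum[d]+=1
--             else:
--                 digit_sum[d]=1
--     result=set()
--     for num in a:
--         n=abs(num)
--         digits=set()
--         if n==0:
--             digits.add(0)
--         while n>0:
--             digits.add(n%10)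
--             n=n//10
--         if all(digit_sum[d]==1 for d in digits):
--             result.add(num)
--     return result
-- ===== SOURCE B (Python) =====
-- def remove_elements_with_common_digits(a):
--     def dset(num):
--         n = abs(num)
--         if n == 0:
--             return {0}
--         s = set()
--         while n > 0:
--             s.add(n % 10)
--             n //= 10
--         return s
--
--     sets = [dset(x) for x in a]
--     result = set()
--     for i in range(len(a)):
--         if all(j == i or sets[i].isdisjoint(sets[j]) for j in range(len(a))):
--             result.add(a[i])
--     return result
-- ===== Notes on version B (the rewrite author's own statement) =====
-- stated objective: alternative
-- what changed: Replaces the global digit-count dictionary (two passes building and querying per-digit counts) by a pairwise index scan: each element survives iff its digit set is disjoint from the digit set of every other index.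
import Mathlib
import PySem

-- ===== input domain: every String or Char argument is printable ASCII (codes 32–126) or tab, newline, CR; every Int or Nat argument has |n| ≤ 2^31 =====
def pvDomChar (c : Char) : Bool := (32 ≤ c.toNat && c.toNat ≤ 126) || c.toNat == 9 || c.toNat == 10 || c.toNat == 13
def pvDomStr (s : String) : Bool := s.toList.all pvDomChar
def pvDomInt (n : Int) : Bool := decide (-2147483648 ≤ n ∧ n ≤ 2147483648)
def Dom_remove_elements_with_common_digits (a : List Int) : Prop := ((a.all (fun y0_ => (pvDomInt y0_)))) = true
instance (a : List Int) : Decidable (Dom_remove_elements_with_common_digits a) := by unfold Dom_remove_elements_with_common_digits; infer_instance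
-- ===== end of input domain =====

-- B replaces A's global digit-count dictionary by a pairwise index scan (each element survives iff
-- its digit set is disjoint from every other index's digit set): alternative algorithm, not faster.

-- ===== PORT A =====
-- the digit-extraction steps 'n=abs(num); digits=set(); if n==0: digits.add(0); while n>0: digits.add(n%10); n=n//10'
-- (identical in A, inlined twice, and in B's helper dset); n ≥ 0 throughout so Nat % / is exact for Python's.
def pvDigitLoop (n : Nat) (s : PySem.Set Int) : PySem.Set Int :=
  if n > 0 then pvDigitLoop (n / 10) (PySem.Set.add s ((n % 10 : Nat) : Int)) else s
  termination_by n
  decreasing_by exact Nat.div_lt_self (by omega) (by omega)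

def pvDigits (num : Int) : PySem.Set Int :=
  pvDigitLoop num.natAbs (if num.natAbs = 0 then PySem.Set.add PySem.Set.empty 0 else PySem.Set.empty)

-- 'if d in digit_sum: digit_sum[d]+=1 else: digit_sum[d]=1'
def pvCountStep (ds : PySem.Dict Int Int) (d : Int) : PySem.Dict Int Int :=
  if ds.contains d then ds.modify d 0 (· + 1) else ds.insert d 1

def pvDigitSum (a : List Int) : PySem.Dict Int Int :=
  a.foldl (fun ds num => (pvDigits num).foldl pvCountStep ds) PySem.Dict.empty

def remove_elements_with_common_digits (a : List Int) : List Int :=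
  -- 'digit_sum[d]' never raises: every d ∈ pvDigits num was counted in the first loop, so getD d 0 is exact
  a.foldl (fun res num =>
      if (pvDigits num).all (fun d => (pvDigitSum a).getD d 0 == 1) then PySem.Set.add res num else res)
    PySem.Set.empty

-- ===== PORT B =====
def pvSets (a : List Int) : List (PySem.Set Int) := a.map pvDigits

def remove_elements_with_common_digits_alt (a : List Int) : List Int :=
  -- indices of range(len(a)) are in range, so getD is exact for sets[j] / a[i]
  (List.range a.length).foldl (fun res i =>
      if (List.range a.length).all (fun j =>
            j == i || PySem.Set.isdisjoint ((pvSets a).getD i []) ((pvSets a).getD j [])) then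
        PySem.Set.add res (a.getD i 0)
      else res)
    PySem.Set.empty

-- ===== PRECONDITION & SPEC =====
def Spec_remove_elements_with_common_digits (a : List Int) (out : List Int) : Prop := out = remove_elements_with_common_digits_alt a
instance (a : List Int) (out : List Int) : Decidable (Spec_remove_elements_with_common_digits a out) := by unfold Spec_remove_elements_with_common_digits; infer_instance

-- ===== CLAIM (what is proved, stated in full; the proofs are below) =====
def Claim_equal_remove_elements_with_common_digits : Prop := ∀ (a : List Int), Dom_remove_elements_with_common_digits a → Spec_remove_elements_with_common_digits a (remove_elements_with_common_digits a)

-- ===== LEMMAS AND PROOFS =====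

-- any list equals the range of its indices mapped through getD
theorem pv_eq_range_map {α : Type} (l : List α) (d : α) :
    (List.range l.length).map (fun i => l.getD i d) = l := by
  apply List.ext_getElem
  · simp
  · intro i h1 h2
    simp [List.getD_eq_getElem?_getD, List.getElem?_eq_getElem h2]

-- effect of one counting step on a lookup
theorem pvCountStep_getD (ds : PySem.Dict Int Int) (x d : Int) :
    (pvCountStep ds x).getD d 0 = ds.getD d 0 + (if d = x then 1 else 0) := by
  unfold pvCountStep
  by_cases h : ds.contains x = true
  · rw [if_pos h, PySem.Dict.getD_modify]
    by_cases h2 : d = x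
    · subst h2; simp
    · simp [h2]
  · rw [if_neg h, PySem.Dict.getD_insert]
    by_cases h2 : d = x
    · subst h2
      rw [PySem.Dict.getD_of_not_contains ds 0 (by simpa using h)]
      simp
    · simp [h2]

theorem pv_foldl_countStep_getD (L : List Int) (ds : PySem.Dict Int Int) (d : Int) :
    (L.foldl pvCountStep ds).getD d 0 = ds.getD d 0 + (L.count d : Int) := by
  induction L generalizing ds with
  | nil => simp
  | cons x L ih =>
    simp only [List.foldl_cons, ih, pvCountStep_getD, List.count_cons]
    by_cases h : d = x
    · subst h; simp; ring
    · simp [h]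
      exact fun e => h e.symm

theorem pvDigitLoop_nodup : ∀ n : Nat, ∀ s : PySem.Set Int, s.Nodup → (pvDigitLoop n s).Nodup := by
  intro n
  induction n using Nat.strong_induction_on with
  | _ n ih =>
    intro s hs
    unfold pvDigitLoop
    split
    · exact ih (n / 10) (Nat.div_lt_self (by omega) (by omega)) _ (PySem.Set.nodup_add _ _ hs)
    · exact hs

theorem pvDigits_nodup (num : Int) : (pvDigits num).Nodup := by
  unfold pvDigits
  apply pvDigitLoop_nodup
  split
  · exact PySem.Set.nodup_add _ _ List.nodup_nil
  · exact List.nodup_nil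

theorem pvDigitSum_getD (a : List Int) (d : Int) :
    (pvDigitSum a).getD d 0 = (((a.map pvDigits).countP (fun s => decide (d ∈ s)) : Nat) : Int) := by
  unfold pvDigitSum
  have main : ∀ (l : List Int) (ds : PySem.Dict Int Int),
      (l.foldl (fun ds num => (pvDigits num).foldl pvCountStep ds) ds).getD d 0
        = ds.getD d 0 + ((l.map pvDigits).countP (fun s => decide (d ∈ s)) : Int) := by
    intro l
    induction l with
    | nil => simp
    | cons x l ih =>
      intro ds
      simp only [List.foldl_cons, ih, pv_foldl_countStep_getD, List.map_cons, List.countP_cons]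
      have hcnt : (pvDigits x).count d = if d ∈ pvDigits x then 1 else 0 := by
        by_cases h : d ∈ pvDigits x
        · simp [h, List.count_eq_one_of_mem (pvDigits_nodup x) h]
        · simp [h, List.count_eq_zero_of_not_mem h]
      rw [hcnt]
      by_cases h : d ∈ pvDigits x
      · simp [h]; ring
      · simp [h]
  simp [main]

-- countP = 1 on a Nodup list with a known witness means: no other element satisfies p
theorem pv_countP_eq_one_iff {α : Type} [DecidableEq α] (l : List α) (p : α → Bool) (x : α)
    (hnd : l.Nodup) (hx : x ∈ l) (hpx : p x = true) :
    l.countP p = 1 ↔ ∀ y ∈ l, y ≠ x → p y = false := by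
  have hperm : l.Perm (x :: l.erase x) := List.perm_cons_erase hx
  rw [hperm.countP_eq p]
  rw [List.countP_cons, hpx]
  simp only [if_pos]
  constructor
  · intro h y hy hyx
    by_contra hpy
    have hy' : y ∈ l.erase x := (List.Nodup.mem_erase_iff hnd).mpr ⟨hyx, hy⟩
    have : 0 < (l.erase x).countP p := List.countP_pos_iff.mpr ⟨y, hy', by simpa using hpy⟩
    omega
  · intro h
    have : (l.erase x).countP p = 0 := by
      rw [List.countP_eq_zero]
      intro y hy
      have := (List.Nodup.mem_erase_iff hnd).mp hy
      simp [h y this.2 this.1]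
    omega

theorem pvSets_getD (a : List Int) (i : Nat) (h : i < a.length) :
    (pvSets a).getD i [] = pvDigits (a.getD i 0) := by
  unfold pvSets
  rw [List.getD_eq_getElem _ _ (by simpa using h), List.getD_eq_getElem _ _ h]
  simp

-- the per-element decisions of A and B agree at every index
theorem pv_cond_eq (a : List Int) (i : Nat) (h : i < a.length) :
    ((pvDigits (a.getD i 0)).all (fun d => (pvDigitSum a).getD d 0 == 1)) =
    ((List.range a.length).all (fun j =>
        j == i || PySem.Set.isdisjoint ((pvSets a).getD i []) ((pvSets a).getD j []))) := by
  have hsl : (pvSets a).length = a.length := by simp [pvSets]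
  have hDi : (pvSets a).getD i [] = pvDigits (a.getD i 0) := pvSets_getD a i h
  have key : ∀ d, d ∈ pvDigits (a.getD i 0) →
      ((pvDigitSum a).getD d 0 = 1 ↔
        ∀ j ∈ List.range a.length, j ≠ i → d ∉ (pvSets a).getD j []) := by
    intro d hd
    rw [pvDigitSum_getD]
    rw [show (a.map pvDigits) = pvSets a from rfl]
    conv_lhs => rw [show pvSets a = (List.range a.length).map (fun j => (pvSets a).getD j []) from
      by conv_lhs => rw [← pv_eq_range_map (pvSets a) []]
         rw [hsl]]
    rw [List.countP_map]
    rw [show ((1 : Int) = ((1 : Nat) : Int)) from rfl, Int.natCast_inj]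
    rw [pv_countP_eq_one_iff _ _ i List.nodup_range (List.mem_range.mpr h)
      (by simp only [Function.comp, hDi, decide_eq_true_eq]; exact hd)]
    simp only [Function.comp, decide_eq_false_iff_not]
  rw [Bool.eq_iff_iff]
  simp only [List.all_eq_true, beq_iff_eq, Bool.or_eq_true, PySem.Set.isdisjoint_iff]
  constructor
  · intro hA j hj
    by_cases hji : j = i
    · exact Or.inl (by simpa using hji)
    · refine Or.inr ?_
      intro d hdDi
      rw [hDi] at hdDi
      exact (key d hdDi).mp (by simpa using hA d hdDi) j hj hji
  · intro hB d hd
    have : (pvDigitSum a).getD d 0 = 1 := by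
      apply (key d hd).mpr
      intro j hj hji hmem
      rcases hB j hj with h1 | h2
      · exact hji (by simpa using h1)
      · exact h2 d (hDi ▸ hd) hmem
    simpa using this

-- ===== VERDICT (by name: the statement is the Claim_ definition above) =====
theorem remove_elements_with_common_digits_spec : Claim_equal_remove_elements_with_common_digits := by
  intro a _
  unfold Spec_remove_elements_with_common_digits remove_elements_with_common_digits remove_elements_with_common_digits_alt
  conv_lhs => rw [← pv_eq_range_map a 0]
  rw [List.foldl_map]
  apply PySem.List.foldl_congr_mem
  intro res i hi
  rw [pv_eq_range_map a 0]
  rw [pv_cond_eq a i (List.mem_range.mp hi)]
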